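-- pv_equiv track=rewrite | github.com/Abhineetraj07/agent-marketplace | filmbot_v2/ui.py | _extract_names
-- ===== SOURCE A (Python) =====
-- def _extract_names(text: str) -> list[str]:
--     """Extract potential proper names (capitalized words) from text."""
--     words = text.split()
--     names = []
--     current_name = []
--
--     for word in words:
--         cleaned = word.strip("?.,!'\"")
--         if cleaned and cleaned[0].isupper() and cleaned.lower() not in (
--             "which", "who", "what", "how", "the", "a", "an", "find", "show",
--             "list", "get", "movies", "films", "actors", "directors", "with",
--             "have", "has", "worked", "acted", "directed", "and", "or", "in",
--             "are", "is", "top", "best", "knowledge", "graph",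
--         ):
--             current_name.append(cleaned)
--         else:
--             if current_name:
--                 names.append(" ".join(current_name))
--                 current_name = []
--     if current_name:
--         names.append(" ".join(current_name))
--
--     return names
-- ===== SOURCE B (Python) =====
-- _STOPS = {
--     "which", "who", "what", "how", "the", "a", "an", "find", "show",
--     "list", "get", "movies", "films", "actors", "directors", "with",
--     "have", "has", "worked", "acted", "directed", "and", "or", "in",
--     "are", "is", "top", "best", "knowledge", "graph",
-- }
--
--
-- def _is_name(cleaned: str) -> bool:
--     return bool(cleaned) and cleaned[0].isupper() and cleaned.lower() not in _STOPS
--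
--
-- def _extract_names(text: str) -> list[str]:
--     """Extract potential proper names (capitalized words) from text."""
--     cleaned = [w.strip("?.,!'\"") for w in text.split()]
--     names = []
--     i, n = 0, len(cleaned)
--     while i < n:
--         if not _is_name(cleaned[i]):
--             i += 1
--             continue
--         j = i
--         while j < n and _is_name(cleaned[j]):
--             j += 1
--         names.append(" ".join(cleaned[i:j]))
--         i = j
--     return names
-- ===== Notes on version B (the rewrite author's own statement) =====
-- stated objective: alternative
-- what changed: Replaces A's single fold with a mutable current-run accumulator and a post-loop flush by a clean-once pass followed by a run-based scan (two-pointer/takeWhile over consecutive name words), so each name phrase is emitted where its run ends and no flush logic is needed.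
import Mathlib
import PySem

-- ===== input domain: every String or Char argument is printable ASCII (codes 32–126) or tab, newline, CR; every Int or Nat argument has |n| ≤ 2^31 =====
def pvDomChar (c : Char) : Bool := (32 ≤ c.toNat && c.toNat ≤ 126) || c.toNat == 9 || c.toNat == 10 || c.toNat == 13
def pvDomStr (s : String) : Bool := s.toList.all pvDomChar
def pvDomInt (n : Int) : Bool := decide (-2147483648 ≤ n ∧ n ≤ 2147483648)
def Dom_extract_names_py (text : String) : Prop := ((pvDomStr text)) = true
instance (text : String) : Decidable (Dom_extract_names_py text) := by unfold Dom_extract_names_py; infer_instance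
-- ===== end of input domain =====

-- B replaces A's fold with a pending-run accumulator and post-loop flush by a run-based
-- scan over the once-cleaned word list (alternative decomposition, same O(n) cost).

-- ===== PORT A =====
-- the stop-word tuple of A (B's Python keeps the same words as a set)
def pvStops : List String :=
  ["which", "who", "what", "how", "the", "a", "an", "find", "show",
   "list", "get", "movies", "films", "actors", "directors", "with",
   "have", "has", "worked", "acted", "directed", "and", "or", "in",
   "are", "is", "top", "best", "knowledge", "graph"]

-- A's (and B's) name test: `cleaned and cleaned[0].isupper() and cleaned.lower() not in (…)`
-- (short-circuit: cleaned[0] is only read when cleaned is nonempty, hence the none arm is dead)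
def pvIsName (cleaned : String) : Bool :=
  !(cleaned == "") &&
  (match PySem.Str.pyGet? cleaned 0 with
   | some c => PySem.Chars.isupper c
   | none => false) &&
  !(pvStops.contains (PySem.Str.lower cleaned))

-- A's loop body: extend the current run, or flush it into names
def pvStep (st : List String × List String) (cleaned : String) :
    List String × List String :=
  if pvIsName cleaned then (st.1, st.2 ++ [cleaned])
  else if st.2 ≠ [] then (st.1 ++ [PySem.Str.join " " st.2], ([] : List String))
  else st

def extract_names_py (text : String) : List String :=
  let st := (PySem.Str.split₀ text).foldl
      (fun st word => pvStep st (PySem.Str.stripChars word "?.,!'\"")) ([], [])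
  if st.2 ≠ [] then st.1 ++ [PySem.Str.join " " st.2] else st.1

-- ===== PORT B =====
-- B's run scan: the inner index loop `j += 1 while _is_name(cleaned[j])` delimits exactly
-- the maximal run of name words starting at i, i.e. takeWhile/dropWhile of pvIsName here.
def pvRuns (l : List String) : List String :=
  match l with
  | [] => []
  | c :: rest =>
    if h : pvIsName c then
      PySem.Str.join " " ((c :: rest).takeWhile pvIsName)
        :: pvRuns ((c :: rest).dropWhile pvIsName)
    else pvRuns rest
termination_by l.length
decreasing_by
  · simp only [List.dropWhile_cons, h, if_true]
    have := List.length_dropWhile_le pvIsName rest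
    simp only [List.length_cons]; omega
  · simp

def extract_names_py_alt (text : String) : List String :=
  pvRuns ((PySem.Str.split₀ text).map (fun w => PySem.Str.stripChars w "?.,!'\""))

-- ===== PRECONDITION & SPEC =====
def Spec_extract_names_py (text : String) (out : List String) : Prop := out = extract_names_py_alt text
instance (text : String) (out : List String) : Decidable (Spec_extract_names_py text out) := by unfold Spec_extract_names_py; infer_instance

-- ===== CLAIM (what is proved, stated in full; the proofs are below) =====
def Claim_equal_extract_names_py : Prop := ∀ (text : String), Dom_extract_names_py text → Spec_extract_names_py text (extract_names_py text)

-- ===== LEMMAS AND PROOFS =====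
-- A's flush of the final pending run
def pvFinish (st : List String × List String) : List String :=
  if st.2 ≠ [] then st.1 ++ [PySem.Str.join " " st.2] else st.1

-- invariant of A's fold: from state (names, cur), the finished result is names followed by
-- the runs of l, the first run being glued onto the pending cur when cur is nonempty
lemma pvFold_eq_runs (l : List String) : ∀ names cur : List String,
    pvFinish (l.foldl pvStep (names, cur)) =
      names ++ (match cur with
        | [] => pvRuns l
        | _ :: _ =>
            PySem.Str.join " " (cur ++ l.takeWhile pvIsName)
              :: pvRuns (l.dropWhile pvIsName)) := by
  induction l with
  | nil =>
    intro names cur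
    cases cur with
    | nil => simp [pvFinish, pvRuns]
    | cons a as => simp [pvFinish, pvRuns]
  | cons w t ih =>
    intro names cur
    cases hw : pvIsName w with
    | true =>
      cases cur with
      | nil =>
        simp only [List.foldl_cons, pvStep, hw, if_true, List.nil_append]
        rw [ih names [w]]
        conv_rhs => rw [pvRuns.eq_def]
        simp [hw]
      | cons a as =>
        simp only [List.foldl_cons, pvStep, hw, if_true]
        rw [ih names ((a :: as) ++ [w])]
        simp [hw]
    | false =>
      cases cur with
      | nil =>
        simp only [List.foldl_cons, pvStep, hw, Bool.false_eq_true, if_false, ne_eq,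
          not_true_eq_false]
        rw [ih names []]
        conv_rhs => rw [pvRuns.eq_def]
        simp [hw]
      | cons a as =>
        simp only [List.foldl_cons, pvStep, hw, Bool.false_eq_true, if_false, ne_eq,
          reduceCtorEq, not_false_iff, if_true]
        rw [ih (names ++ [PySem.Str.join " " (a :: as)]) []]
        conv_rhs => rw [pvRuns.eq_def]
        simp [hw]

-- ===== VERDICT (by name: the statement is the Claim_ definition above) =====
theorem extract_names_py_spec : Claim_equal_extract_names_py := by
  intro text _
  show extract_names_py text = extract_names_py_alt text
  have h := pvFold_eq_runs
      ((PySem.Str.split₀ text).map (fun w => PySem.Str.stripChars w "?.,!'\"")) [] []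
  rw [List.foldl_map] at h
  simp only [pvFinish, List.nil_append] at h
  exact h
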